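-- pv_equiv track=rewrite | github.com/action-learning-week-rep/python-code-for-pcap-analysis | merger.py | total_pushtime
-- ===== SOURCE A (Python) =====
-- def total_pushtime(array):
--     time = 0
--     for i in range(len(array) - 1):
--         time = time + (array[i + 1] - array[i])
--
--     try:
--         return time
--     except:
--         pass
-- ===== SOURCE B (Python) =====
-- def total_pushtime(array):
--     return array[-1] - array[0] if array else 0
-- ===== Notes on version B (the rewrite author's own statement) =====
-- stated objective: faster
-- what changed: The O(n) loop summing consecutive differences telescopes, so B returns last element minus first element directly, and the additive identity for the empty list.
import Mathlib
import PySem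

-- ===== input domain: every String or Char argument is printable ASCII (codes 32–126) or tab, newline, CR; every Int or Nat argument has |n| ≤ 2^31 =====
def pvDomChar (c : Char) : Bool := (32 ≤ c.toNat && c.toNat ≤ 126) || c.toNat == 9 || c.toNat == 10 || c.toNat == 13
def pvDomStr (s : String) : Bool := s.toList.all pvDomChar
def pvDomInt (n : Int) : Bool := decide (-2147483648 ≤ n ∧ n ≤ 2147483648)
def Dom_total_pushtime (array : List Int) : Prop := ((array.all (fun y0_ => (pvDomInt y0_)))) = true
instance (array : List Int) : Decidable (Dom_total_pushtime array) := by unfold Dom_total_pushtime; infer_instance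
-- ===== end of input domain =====

-- B replaces A's O(n) loop over consecutive differences by the telescoped closed form: last element minus first element.

-- ===== PORT A =====
def total_pushtime (array : List Int) : Int :=
  (PySem.List.pyRange 0 ((array.length : Int) - 1) 1).foldl
    (fun time i => time + (PySem.List.pyGetD array (i + 1) 0 - PySem.List.pyGetD array i 0)) 0

-- ===== PORT B =====
def total_pushtime_alt (array : List Int) : Int :=
  if array.isEmpty then 0
  else PySem.List.pyGetD array (-1) 0 - PySem.List.pyGetD array 0 0

-- ===== PRECONDITION & SPEC =====
def Spec_total_pushtime (array : List Int) (out : Int) : Prop := out = total_pushtime_alt array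
instance (array : List Int) (out : Int) : Decidable (Spec_total_pushtime array out) := by unfold Spec_total_pushtime; infer_instance

-- ===== CLAIM (what is proved, stated in full; the proofs are below) =====
def Claim_equal_total_pushtime : Prop := ∀ (array : List Int), Dom_total_pushtime array → Spec_total_pushtime array (total_pushtime array)

-- ===== LEMMAS AND PROOFS =====

-- telescoping of A's loop, for any start value and any index function
theorem pv_tele (f : Int → Int) (n : Nat) (c : Int) :
    (PySem.List.pyRange 0 (n : Int) 1).foldl (fun t i => t + (f (i + 1) - f i)) c
      = c + (f (n : Int) - f 0) := by
  induction n generalizing c with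
  | zero => simp [PySem.List.pyRange_one_eq_nil]
  | succ m ih =>
      rw [show ((m + 1 : Nat) : Int) = (m : Int) + 1 by push_cast; ring,
        PySem.List.pyRange_one_succ_right (by positivity), List.foldl_append, ih]
      simp; ring

-- ===== VERDICT (by name: the statement is the Claim_ definition above) =====
theorem total_pushtime_spec : Claim_equal_total_pushtime := by
  intro array _
  unfold Spec_total_pushtime total_pushtime total_pushtime_alt
  cases array with
  | nil => simp [PySem.List.pyRange_one_eq_nil]
  | cons x xs =>
      have hne : x :: xs ≠ [] := by simp
      have hlen : ((x :: xs).length : Int) - 1 = ((xs.length : Nat) : Int) := by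
        simp
      rw [hlen, pv_tele (fun i => PySem.List.pyGetD (x :: xs) i 0) xs.length 0]
      have h1 : PySem.List.pyGetD (x :: xs) ((xs.length : Nat) : Int) 0
          = (x :: xs).getLast hne := by
        rw [PySem.List.pyGetD_natCast]
        rw [List.getLast_eq_getElem]
        simp [List.getD]
        rfl
      rw [h1, PySem.List.pyGetD_neg_one _ 0 hne]
      simp
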